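-- pv_equiv track=rewrite | github.com/Fari98/MTGP4PEDG | utils/utils.py | find_duplicate_indexes
-- ===== SOURCE A (Python) =====
-- def find_duplicate_indexes(data):
--     seen = {}
--     duplicates = []
--
--     for idx, item in enumerate(data):
--         if item in seen:
--             duplicates.append(idx)
--         else:
--             seen[item] = idx
--
--     return duplicates
-- ===== SOURCE B (Python) =====
-- def find_duplicate_indexes(data):
--     # Build an index table: each item -> the full list of indices where it occurs.
--     positions = {}
--     for idx, item in enumerate(data):
--         positions.setdefault(item, []).append(idx)
--     # Every occurrence except the first of each group is a duplicate index.
--     result = []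
--     for group in positions.values():
--         result.extend(group[1:])
--     return sorted(result)
-- ===== Notes on version B (the rewrite author's own statement) =====
-- stated objective: alternative
-- what changed: Instead of deciding duplicates on the fly with a seen-dict, B first groups all indices per item into an index table, then emits every group's indices except the first and sorts the collected indices.
import Mathlib
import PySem

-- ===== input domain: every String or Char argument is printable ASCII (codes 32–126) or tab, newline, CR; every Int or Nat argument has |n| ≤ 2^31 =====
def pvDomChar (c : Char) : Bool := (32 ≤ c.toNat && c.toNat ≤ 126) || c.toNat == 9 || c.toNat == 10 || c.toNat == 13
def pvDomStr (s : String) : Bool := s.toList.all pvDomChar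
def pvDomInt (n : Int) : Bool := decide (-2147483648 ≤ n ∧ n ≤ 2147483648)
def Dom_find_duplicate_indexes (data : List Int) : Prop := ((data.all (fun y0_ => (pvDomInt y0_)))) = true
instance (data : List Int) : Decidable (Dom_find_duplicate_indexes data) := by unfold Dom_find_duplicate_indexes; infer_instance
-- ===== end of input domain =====

-- B replaces A's decide-on-the-fly seen-dict pass by building a per-item index table,
-- then emitting each group's non-first indices and sorting; an alternative decomposition (not faster).


-- ===== PORT A =====
def find_duplicate_indexes (data : List Int) : List Int :=
  ((PySem.List.enumerate data 0).foldl
    (fun (st : PySem.Dict Int Int × List Int) p =>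
      if st.1.contains p.2 then (st.1, st.2 ++ [p.1])
      else (st.1.insert p.2 p.1, st.2))
    (PySem.Dict.empty, [])).2

-- ===== PORT B =====
def find_duplicate_indexes_alt (data : List Int) : List Int :=
  let positions : PySem.Dict Int (List Int) :=
    (PySem.List.enumerate data 0).foldl
      (fun d p => d.modify p.2 [] (fun g => g ++ [p.1])) PySem.Dict.empty
  let result := positions.values.foldl (fun acc g => acc ++ g.drop 1) []
  PySem.List.sorted result (fun x => x) false

-- ===== PRECONDITION & SPEC =====
def Spec_find_duplicate_indexes (data : List Int) (out : List Int) : Prop := out = find_duplicate_indexes_alt data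
instance (data : List Int) (out : List Int) : Decidable (Spec_find_duplicate_indexes data out) := by unfold Spec_find_duplicate_indexes; infer_instance

-- ===== CLAIM (what is proved, stated in full; the proofs are below) =====
def Claim_equal_find_duplicate_indexes : Prop := ∀ (data : List Int), Dom_find_duplicate_indexes data → Spec_find_duplicate_indexes data (find_duplicate_indexes data)

-- ===== LEMMAS AND PROOFS =====

-- Reference list: the indices (numbered from s) of items of xs already seen (in prev or earlier in xs), in emission order.
def dupsFrom (prev : List Int) (xs : List Int) (s : Int) : List Int :=
  match xs with
  | [] => []
  | x :: t => (if x ∈ prev then [s] else []) ++ dupsFrom (prev ++ [x]) t (s + 1)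

-- The occurrence indices of v in xs, in increasing order.
def occ (xs : List Int) (v : Int) : List Int :=
  ((PySem.List.enumerate xs 0).filter (fun p => p.2 == v)).map (·.1)

theorem A_loop (xs : List Int) : ∀ (s : Int) (d : PySem.Dict Int Int) (acc prev : List Int),
    (∀ x, d.contains x = true ↔ x ∈ prev) →
    ((PySem.List.enumerate xs s).foldl
      (fun (st : PySem.Dict Int Int × List Int) p =>
        if st.1.contains p.2 then (st.1, st.2 ++ [p.1])
        else (st.1.insert p.2 p.1, st.2)) (d, acc)).2 = acc ++ dupsFrom prev xs s := by
  induction xs with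
  | nil => intro s d acc prev h; simp [PySem.List.enumerate_nil, dupsFrom]
  | cons x t ih =>
    intro s d acc prev h
    rw [PySem.List.enumerate_cons]
    simp only [List.foldl_cons, dupsFrom]
    by_cases hx : x ∈ prev
    · have hc : d.contains x = true := (h x).mpr hx
      simp only [hc, reduceIte, if_pos hx]
      rw [ih (s+1) d (acc ++ [s]) (prev ++ [x])
        (by intro y; rw [h y]; simp; intro hy; subst hy; exact hx)]
      simp
    · have hc : d.contains x = false := by
        by_contra hcc
        exact hx ((h x).mp (by simpa using hcc))
      simp only [hc, Bool.false_eq_true, reduceIte, if_neg hx]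
      rw [ih (s+1) (d.insert x s) acc (prev ++ [x])
        (by intro y
            rw [PySem.Dict.contains_insert, Bool.or_eq_true, beq_iff_eq, h y, List.mem_append,
              List.mem_singleton]
            tauto)]
      simp

theorem mem_dupsFrom (xs : List Int) : ∀ (prev : List Int) (s j : Int),
    (j ∈ dupsFrom prev xs s ↔
      ∃ k : Nat, ∃ _h : k < xs.length, j = s + k ∧ xs[k] ∈ prev ++ xs.take k) := by
  induction xs with
  | nil => intro prev s j; simp [dupsFrom]
  | cons x t ih =>
    intro prev s j
    simp only [dupsFrom, List.mem_append]
    constructor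
    · rintro (hj | hj)
      · refine ⟨0, by simp, ?_, ?_⟩
        · split_ifs at hj with hx
          · simpa using hj
          · simp at hj
        · split_ifs at hj with hx
          · simpa using hx
          · simp at hj
      · obtain ⟨k, hk, hjk, hmem⟩ := (ih (prev ++ [x]) (s+1) j).mp hj
        refine ⟨k+1, by simpa using hk, by omega, ?_⟩
        simpa [List.append_assoc] using hmem
    · rintro ⟨k, hk, hjk, hmem⟩
      cases k with
      | zero =>
        left
        simp at hmem
        simp [hmem, hjk]
      | succ m =>
        right
        refine (ih (prev ++ [x]) (s+1) j).mpr ⟨m, by simpa using hk, by push_cast at hjk ⊢; omega, ?_⟩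
        simpa [List.append_assoc] using hmem

theorem dupsFrom_ge (xs : List Int) : ∀ (prev : List Int) (s : Int), ∀ j ∈ dupsFrom prev xs s, s ≤ j := by
  induction xs with
  | nil => intro prev s j h; simp [dupsFrom] at h
  | cons x t ih =>
    intro prev s j h
    simp only [dupsFrom, List.mem_append] at h
    rcases h with h | h
    · split_ifs at h with hx
      · simp at h; omega
      · simp at h
    · have := ih (prev ++ [x]) (s+1) j h; omega

theorem dupsFrom_pairwise (xs : List Int) : ∀ (prev : List Int) (s : Int),
    (dupsFrom prev xs s).Pairwise (· < ·) := by
  induction xs with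
  | nil => intro prev s; simp [dupsFrom]
  | cons x t ih =>
    intro prev s
    simp only [dupsFrom]
    split_ifs with hx
    · simp only [List.singleton_append, List.pairwise_cons]
      exact ⟨fun j hj => by have := dupsFrom_ge t (prev ++ [x]) (s+1) j hj; omega, ih _ _⟩
    · simpa using ih (prev ++ [x]) (s+1)

theorem occ_pairwise (xs : List Int) (v : Int) : (occ xs v).Pairwise (· < ·) := by
  unfold occ
  rw [List.pairwise_map]
  exact (PySem.List.pairwise_lt_enumerate xs 0).filter _

theorem mem_occ (xs : List Int) (v j : Int) :
    j ∈ occ xs v ↔ ∃ k : Nat, ∃ _h : k < xs.length, j = (k : Int) ∧ xs[k] = v := by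
  unfold occ
  simp only [List.mem_map, List.mem_filter, PySem.List.mem_enumerate_iff]
  constructor
  · rintro ⟨p, ⟨⟨k, hk, rfl⟩, hv⟩, rfl⟩
    exact ⟨k, hk, by simp, by simpa using hv⟩
  · rintro ⟨k, hk, rfl, hv⟩
    exact ⟨((k : Int), xs[k]), ⟨⟨k, hk, by simp⟩, by simpa using hv⟩, rfl⟩

theorem mem_drop_one_of_pairwise {l : List Int} (h : l.Pairwise (· < ·)) (j : Int) :
    j ∈ l.drop 1 ↔ j ∈ l ∧ ∃ i ∈ l, i < j := by
  cases l with
  | nil => simp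
  | cons a rest =>
    simp only [List.drop_one, List.tail_cons, List.mem_cons, List.pairwise_cons] at *
    obtain ⟨ha, _⟩ := h
    constructor
    · intro hj
      exact ⟨Or.inr hj, a, Or.inl rfl, ha j hj⟩
    · rintro ⟨hj | hj, i, hi, hlt⟩
      · subst hj
        rcases hi with rfl | hi
        · omega
        · have := ha i hi; omega
      · exact hj

theorem Bcore_mem (xs : List Int) (j : Int) :
    j ∈ (PySem.Set.ofList xs).flatMap (fun v => (occ xs v).drop 1) ↔
      ∃ k : Nat, ∃ _h : k < xs.length, j = (k : Int) ∧ xs[k] ∈ xs.take k := by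
  rw [List.mem_flatMap]
  constructor
  · rintro ⟨v, hv, hj⟩
    rw [mem_drop_one_of_pairwise (occ_pairwise xs v)] at hj
    obtain ⟨hjo, i, hio, hij⟩ := hj
    obtain ⟨k, hk, rfl, hkv⟩ := (mem_occ xs v j).mp hjo
    obtain ⟨m, hm, rfl, hmv⟩ := (mem_occ xs v i).mp hio
    have hmk : m < k := by exact_mod_cast hij
    refine ⟨k, hk, rfl, ?_⟩
    rw [hkv, ← hmv]
    have : m < (xs.take k).length := by simp; omega
    have := List.getElem_mem this
    rwa [List.getElem_take] at this
  · rintro ⟨k, hk, rfl, hmem⟩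
    obtain ⟨m, hm, hgm⟩ := List.mem_iff_getElem.mp hmem
    have hm' : m < k := by simp at hm; omega
    have hmlen : m < xs.length := by omega
    rw [List.getElem_take] at hgm
    refine ⟨xs[k], by rw [PySem.Set.mem_ofList]; exact List.getElem_mem hk, ?_⟩
    rw [mem_drop_one_of_pairwise (occ_pairwise xs xs[k])]
    refine ⟨(mem_occ xs xs[k] k).mpr ⟨k, hk, rfl, rfl⟩, (m : Int),
      (mem_occ _ _ _).mpr ⟨m, hmlen, rfl, hgm⟩, by exact_mod_cast hm'⟩

theorem Bcore_nodup (xs : List Int) :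
    ((PySem.Set.ofList xs).flatMap (fun v => (occ xs v).drop 1)).Nodup := by
  rw [List.nodup_flatMap]
  constructor
  · intro v hv
    exact List.Pairwise.sublist (List.drop_sublist 1 _) ((occ_pairwise xs v).imp fun h => ne_of_lt h)
  · have hnd := PySem.Set.nodup_ofList (xs := xs)
    refine hnd.imp_of_mem ?_
    intro a b ha hb hab j hja hjb
    have hja' := (List.drop_sublist 1 _).mem hja
    have hjb' := (List.drop_sublist 1 _).mem hjb
    obtain ⟨k, hk, rfl, hka⟩ := (mem_occ xs a j).mp hja'
    obtain ⟨m, hm, hjm, hmb⟩ := (mem_occ xs b _).mp hjb'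
    have : k = m := by exact_mod_cast hjm
    subst this
    exact hab (by rw [← hka, ← hmb])

theorem B_values (xs : List Int) :
    ((PySem.List.enumerate xs 0).foldl
      (fun d p => d.modify p.2 [] (fun g => g ++ [p.1])) (PySem.Dict.empty : PySem.Dict Int (List Int))).values
      = (PySem.Set.ofList xs).map (fun v => occ xs v) := by
  have hnd : ((PySem.List.enumerate xs 0).foldl
      (fun d p => d.modify p.2 [] (fun g => g ++ [p.1])) (PySem.Dict.empty : PySem.Dict Int (List Int))).keys.Nodup :=
    PySem.Dict.nodup_keys_foldl_modify_key (PySem.List.enumerate xs 0) (fun (p : Int × Int) => p.2) []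
      (fun d (p : Int × Int) => (fun g => g ++ [p.1])) _ PySem.Dict.nodup_keys_empty
  rw [PySem.Dict.values_eq_map_keys _ hnd []]
  have hkeys : ((PySem.List.enumerate xs 0).foldl
      (fun d p => d.modify p.2 [] (fun g => g ++ [p.1])) (PySem.Dict.empty : PySem.Dict Int (List Int))).keys
      = PySem.Set.ofList xs := by
    rw [PySem.Dict.keys_foldl_modify_key]
    simp [PySem.List.map_snd_enumerate, PySem.Set.update, PySem.Set.ofList_eq_foldl]
  rw [hkeys]
  apply List.map_congr_left
  intro v hv
  have hfold : (PySem.List.enumerate xs 0).foldl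
      (fun d p => d.modify p.2 [] (fun g => g ++ [p.1])) (PySem.Dict.empty : PySem.Dict Int (List Int))
      = ((PySem.List.enumerate xs 0).map Prod.swap).foldl
      (fun d p => d.modify p.1 [] (fun g => g ++ [p.2])) (PySem.Dict.empty : PySem.Dict Int (List Int)) := by
    rw [List.foldl_map]; rfl
  rw [hfold, PySem.Dict.getD_foldl_modify_append]
  unfold occ
  rw [List.filter_map, List.map_map]
  simp [Function.comp_def, PySem.Dict.getD_empty]

theorem B_eq (data : List Int) : find_duplicate_indexes_alt data
    = PySem.List.sorted ((PySem.Set.ofList data).flatMap (fun v => (occ data v).drop 1)) (fun x => x) false := by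
  show PySem.List.sorted (((PySem.List.enumerate data 0).foldl
      (fun d p => d.modify p.2 [] (fun g => g ++ [p.1]))
      (PySem.Dict.empty : PySem.Dict Int (List Int))).values.foldl
      (fun acc g => acc ++ g.drop 1) []) (fun x => x) false = _
  rw [B_values, PySem.List.foldl_append_eq_flatMap, List.nil_append, List.flatMap_map]

-- ===== VERDICT (by name: the statement is the Claim_ definition above) =====
theorem find_duplicate_indexes_spec : Claim_equal_find_duplicate_indexes := by
  intro data _hdom
  unfold Spec_find_duplicate_indexes find_duplicate_indexes
  rw [A_loop data 0 PySem.Dict.empty [] [] (by intro x; simp [PySem.Dict.contains_empty])]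
  rw [List.nil_append, B_eq]
  symm
  apply PySem.List.sorted_eq_of_perm_of_pairwise_lt
  · refine (List.perm_ext_iff_of_nodup ?_ (Bcore_nodup data)).mpr ?_
    · exact (dupsFrom_pairwise data [] 0).imp fun h => ne_of_lt h
    · intro j
      rw [mem_dupsFrom, Bcore_mem]
      simp
  · exact dupsFrom_pairwise data [] 0
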